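-- pv_equiv track=rewrite | github.com/MrBrantCode/unitest_baseline | mut_generate/mist_train_taco/taco_17229/solution.py | reduce_recipe
-- ===== SOURCE A (Python) =====
-- def reduce_recipe(test_cases):
--     def find_hcf(numbers):
--         hcf = 1
--         for i in range(2, min(numbers) + 1):
--             if all(num % i == 0 for num in numbers):
--                 hcf = i
--         return hcf
--
--     reduced_recipes = []
--
--     for case in test_cases:
--         N = case[0]
--         ingredients = case[1:]
--         hcf = find_hcf(ingredients)
--         reduced_ingredients = [ingredient // hcf for ingredient in ingredients]
--         reduced_recipes.append(reduced_ingredients)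
--
--     return reduced_recipes
-- ===== SOURCE B (Python) =====
-- def reduce_recipe(test_cases):
--     return [_reduce_case(case) for case in test_cases]
--
--
-- def _reduce_case(case):
--     ingredients = case[1:]
--     g = _hcf(ingredients)
--     return [x // g for x in ingredients]
--
--
-- def _hcf(nums):
--     # the divisors considered are exactly range(2, min(nums) + 1):
--     # when that range is empty the hcf is 1, otherwise the largest
--     # common divisor is the (positive) Euclidean gcd of the numbers
--     if min(nums) < 2:
--         return 1
--     g = 0
--     for x in nums:
--         g = _gcd(g, x)
--     return g
--
--
-- def _gcd(a, b):
--     while b: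
--         a, b = b, a % b
--     return a
-- ===== Notes on version B (the rewrite author's own statement) =====
-- stated objective: alternative
-- what changed: find_hcf's trial scan over every integer in range(2, min(ingredients)+1) is replaced by its contract: 1 when that range is empty, otherwise a Euclidean gcd (while b: a, b = b, a % b) folded over the ingredients; the outer loop becomes a comprehension over a per-case helper.
import Mathlib
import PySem

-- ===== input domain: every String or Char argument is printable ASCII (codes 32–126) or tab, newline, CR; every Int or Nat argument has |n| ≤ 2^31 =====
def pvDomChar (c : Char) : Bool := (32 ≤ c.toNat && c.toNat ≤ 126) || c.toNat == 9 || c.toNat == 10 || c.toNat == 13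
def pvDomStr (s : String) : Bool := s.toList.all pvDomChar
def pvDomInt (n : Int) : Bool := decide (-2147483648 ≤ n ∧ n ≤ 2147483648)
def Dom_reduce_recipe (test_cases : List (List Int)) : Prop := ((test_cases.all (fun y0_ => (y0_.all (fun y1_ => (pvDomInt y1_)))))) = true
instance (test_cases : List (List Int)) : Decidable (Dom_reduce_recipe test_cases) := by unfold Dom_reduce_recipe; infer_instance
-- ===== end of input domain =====

-- B replaces find_hcf's trial scan over range(2, min+1) by its contract: 1 when that range is
-- empty, otherwise a Euclidean gcd folded over the ingredients (objective: alternative).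

-- ===== PORT A =====
-- A's inner helper find_hcf; min([]) raises ValueError in Python, so Pre_ excludes cases
-- with no ingredients and the `getD 0` default is never reached on admitted inputs.
def findHcf (numbers : List Int) : Int :=
  let m : Int := (PySem.List.min? numbers (fun x => x)).getD 0
  (PySem.List.pyRange 2 (m + 1)).foldl
    (fun hcf i => if numbers.all (fun num => PySem.Int.mod num i == 0) then i else hcf) 1

def reduce_recipe (test_cases : List (List Int)) : List (List Int) :=
  test_cases.foldl
    (fun reduced_recipes case =>
      -- N = case[0] is bound but never used by A; on an empty case Python raises IndexError (excluded by Pre_)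
      let ingredients := PySem.List.slice case (some 1) none
      let hcf := findHcf ingredients
      let reduced_ingredients := ingredients.map (fun ingredient => PySem.Int.floordiv ingredient hcf)
      reduced_recipes ++ [reduced_ingredients]) []

-- ===== PORT B =====
-- the while-loop of Source B's _gcd; the fuel |b|+1 only bounds the iteration count (|a % b| < |b|),
-- making the recursion structural — the computation is exactly the Python loop.
def gcdLoop : Nat → Int → Int → Int
  | 0, a, _ => a
  | Nat.succ f, a, b => if b = 0 then a else gcdLoop f b (PySem.Int.mod a b)

def pygcd (a b : Int) : Int := gcdLoop (b.natAbs + 1) a b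

-- Source B's _hcf; as in A, min([]) raises ValueError (excluded by Pre_), default never reached there
def pyHcf (nums : List Int) : Int :=
  let m : Int := (PySem.List.min? nums (fun x => x)).getD 0
  if m < 2 then 1 else nums.foldl pygcd 0

def reduceCase (case : List Int) : List Int :=
  let ingredients := PySem.List.slice case (some 1) none
  let g := pyHcf ingredients
  ingredients.map (fun x => PySem.Int.floordiv x g)

def reduce_recipe_alt (test_cases : List (List Int)) : List (List Int) :=
  test_cases.map reduceCase

-- ===== PRECONDITION & SPEC =====
-- Exactly A's domain: on a case with fewer than 2 entries Python A raises (IndexError on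
-- case[0] or ValueError from min([])); on every other input A returns normally.
def Pre_reduce_recipe (test_cases : List (List Int)) : Prop :=
  ∀ case ∈ test_cases, 2 ≤ case.length
instance (test_cases : List (List Int)) : Decidable (Pre_reduce_recipe test_cases) := by
  unfold Pre_reduce_recipe; infer_instance

def pvWitness_reduce_recipe : List (List Int) := [[2, 4, 6], [3, 2, 3, 4], [1, -4, 8]]

def Spec_reduce_recipe (test_cases : List (List Int)) (out : List (List Int)) : Prop := out = reduce_recipe_alt test_cases
instance (test_cases : List (List Int)) (out : List (List Int)) : Decidable (Spec_reduce_recipe test_cases out) := by unfold Spec_reduce_recipe; infer_instance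

-- ===== CLAIM (what is proved, stated in full; the proofs are below) =====
def Claim_equal_reduce_recipe : Prop := ∀ (test_cases : List (List Int)), Dom_reduce_recipe test_cases → Pre_reduce_recipe test_cases → Spec_reduce_recipe test_cases (reduce_recipe test_cases)

-- ===== LEMMAS AND PROOFS =====

lemma pymod_natAbs_lt (a : Int) {b : Int} (hb : b ≠ 0) : (PySem.Int.mod a b).natAbs < b.natAbs := by
  rcases lt_or_gt_of_ne hb with h | h
  · have := PySem.Int.mod_neg_bounds a h; omega
  · have h1 := PySem.Int.mod_nonneg a h
    have h2 := PySem.Int.mod_lt a h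
    omega

-- the Euclidean loop computes a greatest common divisor (as divisibility facts), for nonneg args
lemma gcdLoop_spec : ∀ (f : Nat) (a b : Int), b.natAbs < f → 0 ≤ a → 0 ≤ b →
    (0 ≤ gcdLoop f a b ∧ gcdLoop f a b ∣ a ∧ gcdLoop f a b ∣ b ∧
      ∀ c : Int, c ∣ a → c ∣ b → c ∣ gcdLoop f a b) := by
  intro f
  induction f with
  | zero => intro a b hf _ _; omega
  | succ f ih =>
    intro a b hf ha hb
    by_cases hb0 : b = 0
    · subst hb0
      simp [gcdLoop, ha]
    · have hbpos : 0 < b := by omega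
      have hmlt := pymod_natAbs_lt a hb0
      have hmnn := PySem.Int.mod_nonneg a hbpos
      have hrec := ih b (PySem.Int.mod a b) (by omega) hb hmnn
      simp only [gcdLoop, if_neg hb0]
      obtain ⟨h0, hdb, hdm, hmax⟩ := hrec
      refine ⟨h0, ?_, hdb, ?_⟩
      · have h2 : gcdLoop f b (PySem.Int.mod a b) ∣ PySem.Int.floordiv a b * b + PySem.Int.mod a b :=
          dvd_add (Dvd.dvd.mul_left hdb _) hdm
        rwa [PySem.Int.floordiv_mul_add_mod] at h2
      · intro c hca hcb
        refine hmax c hcb ?_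
        have heq := PySem.Int.floordiv_mul_add_mod a b
        have : PySem.Int.mod a b = a - PySem.Int.floordiv a b * b := by omega
        rw [this]
        exact dvd_sub hca (Dvd.dvd.mul_left hcb _)

lemma pygcd_spec (a b : Int) (ha : 0 ≤ a) (hb : 0 ≤ b) :
    0 ≤ pygcd a b ∧ pygcd a b ∣ a ∧ pygcd a b ∣ b ∧
      ∀ c : Int, c ∣ a → c ∣ b → c ∣ pygcd a b :=
  gcdLoop_spec (b.natAbs + 1) a b (by omega) ha hb

lemma foldl_pygcd_spec : ∀ (t : List Int) (a : Int), 0 ≤ a → (∀ x ∈ t, 1 ≤ x) →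
    (0 ≤ t.foldl pygcd a ∧ t.foldl pygcd a ∣ a ∧ (∀ x ∈ t, t.foldl pygcd a ∣ x) ∧
      ∀ c : Int, c ∣ a → (∀ x ∈ t, c ∣ x) → c ∣ t.foldl pygcd a) := by
  intro t
  induction t with
  | nil => intro a ha _; exact ⟨ha, dvd_rfl, by simp, fun c hc _ => hc⟩
  | cons x xs ih =>
    intro a ha hpos
    have hx : (1 : Int) ≤ x := hpos x (by simp)
    obtain ⟨hg0, hga, hgx, hgmax⟩ := pygcd_spec a x ha (by omega)
    obtain ⟨h0, hda, hdx, hmax⟩ := ih (pygcd a x) hg0 (fun y hy => hpos y (by simp [hy]))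
    simp only [List.foldl_cons]
    refine ⟨h0, hda.trans hga, ?_, ?_⟩
    · intro y hy
      rcases List.mem_cons.1 hy with rfl | hy
      · exact hda.trans hgx
      · exact hdx y hy
    · intro c hca hcx
      exact hmax c (hgmax c hca (hcx x (by simp))) (fun y hy => hcx y (by simp [hy]))

-- invariant of A's trial-division fold over range(2, u): the running hcf is the largest i < u
-- with 2 ≤ i that passes the divisibility test (characterised as i ∣ d), else 1
lemma range_fold_inv (test : Int → Bool) (d : Int)
    (htest : ∀ i : Int, 2 ≤ i → (test i = true ↔ i ∣ d)) :
    ∀ u : Nat,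
      (((PySem.List.pyRange 2 (u : Int)).foldl (fun hcf i => if test i then i else hcf) 1 = 1 ∨
        (2 ≤ (PySem.List.pyRange 2 (u : Int)).foldl (fun hcf i => if test i then i else hcf) 1 ∧
         (PySem.List.pyRange 2 (u : Int)).foldl (fun hcf i => if test i then i else hcf) 1 ∣ d ∧
         (PySem.List.pyRange 2 (u : Int)).foldl (fun hcf i => if test i then i else hcf) 1 < (u : Int))) ∧
       ∀ i : Int, 2 ≤ i → i ∣ d → i < (u : Int) →
         i ≤ (PySem.List.pyRange 2 (u : Int)).foldl (fun hcf i => if test i then i else hcf) 1) := by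
  intro u
  induction u with
  | zero =>
    have hnil : PySem.List.pyRange 2 ((0 : Nat) : Int) = [] := by decide
    rw [hnil]
    exact ⟨Or.inl rfl, by intro i h1 _ h3; omega⟩
  | succ u ih =>
    by_cases hu : 2 ≤ (u : Int)
    · have hcast : (((u + 1 : Nat)) : Int) = (u : Int) + 1 := by push_cast; ring
      rw [hcast, PySem.List.pyRange_one_succ_right hu, List.foldl_append]
      obtain ⟨hleft, hmax⟩ := ih
      simp only [List.foldl_cons, List.foldl_nil]
      by_cases ht : test (u : Int) = true
      · rw [if_pos ht]
        refine ⟨Or.inr ⟨hu, (htest _ hu).1 ht, by omega⟩, ?_⟩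
        intro i h2 hid hiu
        have := hmax i h2 hid
        omega
      · rw [if_neg ht]
        refine ⟨?_, ?_⟩
        · rcases hleft with h | ⟨h1, h2, h3⟩
          · exact Or.inl h
          · exact Or.inr ⟨h1, h2, by omega⟩
        · intro i h2 hid hiu
          have hne : i ≠ (u : Int) := by
            intro h
            exact ht (by rw [← h] at *; exact (htest i h2).2 hid)
          exact hmax i h2 hid (by omega)
    · have hu01 : u = 0 ∨ u = 1 := by omega
      have hnil : PySem.List.pyRange 2 ((u + 1 : Nat) : Int) = [] := by
        rcases hu01 with rfl | rfl <;> decide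
      rw [hnil]
      exact ⟨Or.inl rfl, by intro i h1 _ h3; push_cast at h3; omega⟩

lemma range_fold_eq (test : Int → Bool) (d : Int) (hd : 1 ≤ d)
    (htest : ∀ i : Int, 2 ≤ i → (test i = true ↔ i ∣ d)) (u : Nat) (hu : d < (u : Int)) :
    (PySem.List.pyRange 2 (u : Int)).foldl (fun hcf i => if test i then i else hcf) 1 = d := by
  obtain ⟨hleft, hmax⟩ := range_fold_inv test d htest u
  by_cases hd2 : 2 ≤ d
  · have hdr := hmax d hd2 dvd_rfl hu
    rcases hleft with h | ⟨h1, h2, _⟩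
    · omega
    · have := Int.le_of_dvd (by omega) h2
      omega
  · have hd1 : d = 1 := by omega
    rcases hleft with h | ⟨h1, h2, _⟩
    · omega
    · have := Int.le_of_dvd (by omega) h2
      omega

-- per-ingredient-list agreement: A's find_hcf equals B's _hcf
lemma hcf_eq (t : List Int) (ht : t ≠ []) : findHcf t = pyHcf t := by
  cases hmin : PySem.List.min? t (fun x => x) with
  | none => exact absurd ((PySem.List.min?_eq_none_iff t _).1 hmin) ht
  | some m =>
    have hm_mem : m ∈ t := PySem.List.min?_mem hmin
    have hm_min : ∀ y ∈ t, m ≤ y := PySem.List.min?_isMin hmin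
    by_cases hm2 : m < 2
    · -- range(2, m+1) is empty: A's fold returns its initial 1, B returns 1 directly
      have hnil : PySem.List.pyRange 2 (m + 1) = [] := by
        refine List.eq_nil_iff_forall_not_mem.2 (fun x hx => ?_)
        have := (PySem.List.mem_pyRange_one).1 hx
        omega
      simp only [findHcf, pyHcf, hmin, Option.getD_some, if_pos hm2, hnil, List.foldl_nil]
    · have hpos : ∀ x ∈ t, (1 : Int) ≤ x := fun x hx => by have := hm_min x hx; omega
      obtain ⟨hd0, -, hdx, hdmax⟩ := foldl_pygcd_spec t 0 le_rfl hpos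
      set d := t.foldl pygcd 0 with hdef
      have hd1 : (1 : Int) ≤ d := by
        rcases eq_or_lt_of_le hd0 with h | h
        · exfalso
          have hdm := hdx m hm_mem
          rw [← h] at hdm
          have : m = 0 := zero_dvd_iff.1 hdm
          omega
        · omega
      have hdm : d ≤ m := Int.le_of_dvd (by omega) (hdx m hm_mem)
      have htest : ∀ i : Int, 2 ≤ i →
          ((t.all fun num => PySem.Int.mod num i == 0) = true ↔ i ∣ d) := by
        intro i h2
        simp only [List.all_eq_true, beq_iff_eq, PySem.Int.mod_eq_zero_iff_dvd]
        constructor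
        · intro h
          exact hdmax i (dvd_zero i) h
        · intro hid x hx
          exact hid.trans (hdx x hx)
      have hcast : (((m + 1).toNat : Nat) : Int) = m + 1 := Int.toNat_of_nonneg (by omega)
      simp only [findHcf, pyHcf, hmin, Option.getD_some, if_neg hm2]
      rw [← hcast]
      exact range_fold_eq _ d hd1 htest (m + 1).toNat (by omega)

lemma reduce_recipe_eq_map (tc : List (List Int)) :
    reduce_recipe tc = tc.map (fun case =>
      (PySem.List.slice case (some 1) none).map
        (fun ingredient => PySem.Int.floordiv ingredient (findHcf (PySem.List.slice case (some 1) none)))) := by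
  simp only [reduce_recipe]
  rw [PySem.List.foldl_append_singleton_eq_map]
  simp

-- ===== VERDICT (by name: the statement is the Claim_ definition above) =====
theorem reduce_recipe_spec : Claim_equal_reduce_recipe := by
  intro tc _ hpre
  unfold Spec_reduce_recipe
  rw [reduce_recipe_eq_map]
  unfold reduce_recipe_alt
  apply List.map_congr_left
  intro case hmem
  have h2 := hpre case hmem
  simp only [reduceCase, PySem.List.slice_from_one]
  have ht : case.tail ≠ [] := by
    cases case with
    | nil => simp at h2
    | cons a t =>
      intro h
      rw [List.tail_cons] at h
      subst h
      simp at h2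
  rw [hcf_eq case.tail ht]
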